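-- pv_equiv track=rewrite | github.com/okami-im/gxmpp | gxmpp/jid.py | _escape_localpart
-- ===== SOURCE A (Python) =====
-- _XEP_0106_ESCAPE = {
--     " ": r"\20",
--     '"': r"\22",
--     "&": r"\26",
--     "'": r"\27",
--     "/": r"\2f",
--     ":": r"\3a",
--     "<": r"\3c",
--     ">": r"\3e",
--     "@": r"\40",
--     "\\": r"\5c",
-- }
--
-- def _escape_localpart(local):
--     if local is None:
--         return None
--     if local[0] == " " or local[-1] == " ":
--         raise ValueError(
--             "localpart must not start or end with the SPACE character (0x20)"
--         )
--     es = ""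
--     i = 0
--     m = len(local)
--     while i < m:
--         c = local[i]
--         es += _XEP_0106_ESCAPE.get(c, c)
--         i += 1
--     return es
-- ===== SOURCE B (Python) =====
-- _XEP_0106_ESCAPE = {
--     " ": r"\20",
--     '"': r"\22",
--     "&": r"\26",
--     "'": r"\27",
--     "/": r"\2f",
--     ":": r"\3a",
--     "<": r"\3c",
--     ">": r"\3e",
--     "@": r"\40",
--     "\\": r"\5c",
-- }
--
-- # the nine non-backslash passes; the backslash pass must run first so the
-- # backslashes inserted by these replacements are never re-escaped
-- _XEP_PASSES = (
--     (" ", r"\20"), ('"', r"\22"), ("&", r"\26"), ("'", r"\27"), ("/", r"\2f"),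
--     (":", r"\3a"), ("<", r"\3c"), (">", r"\3e"), ("@", r"\40"),
-- )
--
-- def _escape_localpart(local):
--     if local is None:
--         return None
--     if local.startswith(" ") or local.endswith(" "):
--         raise ValueError(
--             "localpart must not start or end with the SPACE character (0x20)"
--         )
--     out = local.replace("\\", r"\5c")
--     for ch, rep in _XEP_PASSES:
--         out = out.replace(ch, rep)
--     return out
-- ===== Notes on version B (the rewrite author's own statement) =====
-- stated objective: faster
-- what changed: Replaces the per-character index while-loop with += concatenation by ten whole-string replace passes (backslash escaped first so later insertions are never re-escaped), and the manual local[0]/local[-1] guard by startswith/endswith.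
import Mathlib
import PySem

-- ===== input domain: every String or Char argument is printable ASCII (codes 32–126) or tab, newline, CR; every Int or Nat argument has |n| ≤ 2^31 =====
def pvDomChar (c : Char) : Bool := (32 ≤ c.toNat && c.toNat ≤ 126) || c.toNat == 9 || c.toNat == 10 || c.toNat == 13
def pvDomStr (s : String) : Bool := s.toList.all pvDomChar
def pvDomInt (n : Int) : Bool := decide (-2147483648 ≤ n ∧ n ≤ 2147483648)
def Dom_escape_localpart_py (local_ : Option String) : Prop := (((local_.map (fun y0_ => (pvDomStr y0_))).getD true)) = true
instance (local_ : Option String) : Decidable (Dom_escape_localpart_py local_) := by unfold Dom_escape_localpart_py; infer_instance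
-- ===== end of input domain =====

-- B replaces A's per-character while-loop (+= concatenation) by ten whole-string
-- replace passes, backslash first, and the index guard by startswith/endswith.

-- ===== PORT A =====
-- the module constant _XEP_0106_ESCAPE (dict keyed by single-char strings; ported keyed by Char)
def pvXep0106Escape : PySem.Dict Char String :=
  PySem.Dict.ofList
    [(' ', "\\20"), ('"', "\\22"), ('&', "\\26"), ('\'', "\\27"), ('/', "\\2f"),
     (':', "\\3a"), ('<', "\\3c"), ('>', "\\3e"), ('@', "\\40"), ('\\', "\\5c")]

-- while i < m: es += _XEP_0106_ESCAPE.get(local[i], local[i]) — ported as a left fold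
-- over the chars in index order, es kept as List Char (+= on strings is list append).
-- Where the Python raises ("" → IndexError, leading/trailing space → ValueError) the
-- port returns none; those inputs are excluded by Pre_.
def escape_localpart_py (local_ : Option String) : Option String :=
  match local_ with
  | none => none
  | some s =>
    match PySem.Str.pyGet? s 0, PySem.Str.pyGet? s (-1) with
    | some c0, some cl =>
      if c0 = ' ' ∨ cl = ' ' then none  -- ValueError (outside Pre_)
      else
        some (String.ofList (s.toList.foldl
          (fun es c => es ++ (pvXep0106Escape.getD c (String.singleton c)).toList) []))
    | _, _ => none  -- IndexError on the empty string (outside Pre_)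

-- ===== PORT B =====
-- _XEP_PASSES: the nine non-backslash replace passes, run after the backslash pass
def pvXepPasses : List (String × String) :=
  [(" ", "\\20"), ("\"", "\\22"), ("&", "\\26"), ("'", "\\27"), ("/", "\\2f"),
   (":", "\\3a"), ("<", "\\3c"), (">", "\\3e"), ("@", "\\40")]

def escape_localpart_py_alt (local_ : Option String) : Option String :=
  match local_ with
  | none => none
  | some s =>
    if PySem.Str.startswith s " " || PySem.Str.endswith s " " then none  -- ValueError (outside Pre_)
    else
      some (pvXepPasses.foldl
        (fun out (p : String × String) => PySem.Str.replace out p.1 p.2)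
        (PySem.Str.replace s "\\" "\\5c"))

-- ===== PRECONDITION & SPEC =====
-- Pre_ excludes exactly the inputs on which A raises: the empty string (IndexError)
-- and strings starting or ending with a space (ValueError).
def Pre_escape_localpart_py (local_ : Option String) : Prop :=
  (local_.all (fun s =>
    !s.toList.isEmpty && s.toList.head? != some ' ' && s.toList.getLast? != some ' ')) = true
instance (local_ : Option String) : Decidable (Pre_escape_localpart_py local_) := by
  unfold Pre_escape_localpart_py; infer_instance
def pvWitness_escape_localpart_py : Option String := some "ro@meo"

def Spec_escape_localpart_py (local_ : Option String) (out : Option String) : Prop :=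
  out = escape_localpart_py_alt local_
instance (local_ : Option String) (out : Option String) : Decidable (Spec_escape_localpart_py local_ out) := by
  unfold Spec_escape_localpart_py; infer_instance

-- ===== CLAIM =====
def Claim_equal_escape_localpart_py : Prop := ∀ (local_ : Option String), Dom_escape_localpart_py local_ → Pre_escape_localpart_py local_ → Spec_escape_localpart_py local_ (escape_localpart_py local_)
-- ===== LEMMAS AND PROOFS =====

-- the per-char escape function both sides compute
def pvTab (c : Char) : List Char := (pvXep0106Escape.getD c (String.singleton c)).toList

-- replace.go for a single-char pattern, with enough fuel, is a flatMap
theorem pvReplaceGo_single (o : Char) (new : List Char) :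
    ∀ (l acc : List Char) (fuel : Nat), l.length ≤ fuel →
      PySem.Chars.replace.go [o] new fuel l acc
        = acc.reverse ++ l.flatMap (fun c => if c = o then new else [c]) := by
  intro l
  induction l with
  | nil => intro acc fuel _; cases fuel <;> simp [PySem.Chars.replace.go]
  | cons c t ih =>
    intro acc fuel hf
    cases fuel with
    | zero => simp at hf
    | succ fuel =>
      simp only [PySem.Chars.replace.go]
      by_cases hc : c = o
      · subst hc
        rw [if_pos (by simp [List.isPrefixOf])]
        rw [show List.drop [c].length (c :: t) = t from rfl]
        rw [ih _ fuel (by simpa using hf)]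
        simp
      · rw [if_neg (by simp only [List.isPrefixOf, Bool.and_eq_true, beq_iff_eq, and_true]; exact fun h => hc h.symm)]
        rw [ih _ fuel (by simpa using hf)]
        simp [hc]

-- replace with a single-char pattern is a flatMap over the chars
theorem pvReplace_single (s : List Char) (o : Char) (new : List Char) :
    PySem.Chars.replace s [o] new = s.flatMap (fun c => if c = o then new else [c]) := by
  unfold PySem.Chars.replace
  rw [if_neg (by simp)]
  simpa using pvReplaceGo_single o new s [] s.length le_rfl

-- B's ten replace passes act per original character exactly as the table
theorem pvChain_eq_flatMap (s : List Char) :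
    (PySem.Chars.replace
      (PySem.Chars.replace
        (PySem.Chars.replace
          (PySem.Chars.replace
            (PySem.Chars.replace
              (PySem.Chars.replace
                (PySem.Chars.replace
                  (PySem.Chars.replace
                    (PySem.Chars.replace
                      (PySem.Chars.replace s "\\".toList "\\5c".toList)
                      " ".toList "\\20".toList)
                    "\"".toList "\\22".toList)
                  "&".toList "\\26".toList)
                "'".toList "\\27".toList)
              "/".toList "\\2f".toList)
            ":".toList "\\3a".toList)
          "<".toList "\\3c".toList)
        ">".toList "\\3e".toList)
      "@".toList "\\40".toList)
      = s.flatMap pvTab := by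
  have h : ∀ (t : List Char) (o : Char) (new : List Char) (f : Char → List Char),
      PySem.Chars.replace (t.flatMap f) [o] new
        = t.flatMap (fun c => (f c).flatMap (fun x => if x = o then new else [x])) := by
    intro t o new f
    rw [pvReplace_single, List.flatMap_assoc]
  rw [show ("\\".toList) = ['\\'] from rfl, show (" ".toList) = [' '] from rfl,
      show ("\"".toList) = ['"'] from rfl, show ("&".toList) = ['&'] from rfl,
      show ("'".toList) = ['\''] from rfl, show ("/".toList) = ['/'] from rfl,
      show (":".toList) = [':'] from rfl, show ("<".toList) = ['<'] from rfl,
      show (">".toList) = ['>'] from rfl, show ("@".toList) = ['@'] from rfl]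
  rw [pvReplace_single s '\\']
  rw [h, h, h, h, h, h, h, h, h]
  apply List.flatMap_congr
  intro c _
  by_cases h1 : c = '\\'; · subst h1; decide
  by_cases h2 : c = ' '; · subst h2; decide
  by_cases h3 : c = '"'; · subst h3; decide
  by_cases h4 : c = '&'; · subst h4; decide
  by_cases h5 : c = '\''; · subst h5; decide
  by_cases h6 : c = '/'; · subst h6; decide
  by_cases h7 : c = ':'; · subst h7; decide
  by_cases h8 : c = '<'; · subst h8; decide
  by_cases h9 : c = '>'; · subst h9; decide
  by_cases h10 : c = '@'; · subst h10; decide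
  have g1 : ¬('\\' = c) := fun h => h1 h.symm
  have g2 : ¬(' ' = c) := fun h => h2 h.symm
  have g3 : ¬('"' = c) := fun h => h3 h.symm
  have g4 : ¬('&' = c) := fun h => h4 h.symm
  have g5 : ¬('\'' = c) := fun h => h5 h.symm
  have g6 : ¬('/' = c) := fun h => h6 h.symm
  have g7 : ¬(':' = c) := fun h => h7 h.symm
  have g8 : ¬('<' = c) := fun h => h8 h.symm
  have g9 : ¬('>' = c) := fun h => h9 h.symm
  have g10 : ¬('@' = c) := fun h => h10 h.symm
  have b1 : ('\\' == c) = false := beq_eq_false_iff_ne.mpr g1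
  have b2 : (' ' == c) = false := beq_eq_false_iff_ne.mpr g2
  have b3 : ('"' == c) = false := beq_eq_false_iff_ne.mpr g3
  have b4 : ('&' == c) = false := beq_eq_false_iff_ne.mpr g4
  have b5 : ('\'' == c) = false := beq_eq_false_iff_ne.mpr g5
  have b6 : ('/' == c) = false := beq_eq_false_iff_ne.mpr g6
  have b7 : (':' == c) = false := beq_eq_false_iff_ne.mpr g7
  have b8 : ('<' == c) = false := beq_eq_false_iff_ne.mpr g8
  have b9 : ('>' == c) = false := beq_eq_false_iff_ne.mpr g9
  have b10 : ('@' == c) = false := beq_eq_false_iff_ne.mpr g10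
  simp [b1, b2, b3, b4, b5, b6, b7, b8, b9, b10, pvTab, pvXep0106Escape, PySem.Dict.getD, PySem.Dict.get?, PySem.Dict.ofList,
    PySem.Dict.update, PySem.Dict.insert, PySem.Dict.empty,
    PySem.Dict.contains, List.find?, String.toList_singleton,
    h1, h2, h3, h4, h5, h6, h7, h8, h9, h10]

-- ===== VERDICT =====
-- indexing helper for A's local[-1] guard
theorem pvPyGet_neg_one {α : Type} (l : List α) (h : l ≠ []) :
    PySem.List.pyGet? l (-1) = l.getLast? := by
  have hlen : 1 ≤ l.length := List.length_pos_iff.mpr h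
  simp only [PySem.List.pyGet?, PySem.List.pyIdx?]
  rw [if_neg (by omega), if_pos (by omega)]
  simp [List.getLast?_eq_getElem?]

theorem escape_localpart_py_spec : Claim_equal_escape_localpart_py := by
  intro local_ _ hpre
  show escape_localpart_py local_ = escape_localpart_py_alt local_
  cases local_ with
  | none => rfl
  | some s =>
    simp only [Pre_escape_localpart_py, Option.all_some, Bool.and_eq_true, bne_iff_ne, ne_eq,
      Bool.not_eq_eq_eq_not, Bool.not_true, List.isEmpty_eq_false_iff] at hpre
    obtain ⟨⟨hne, hh⟩, hl⟩ := hpre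
    obtain ⟨c, t, hs⟩ := List.exists_cons_of_ne_nil hne
    have hc : c ≠ ' ' := by intro h; exact hh (by simp [hs, h])
    obtain ⟨d, hd⟩ : ∃ d, s.toList.getLast? = some d := by
      cases hgl : s.toList.getLast? with
      | none => exact absurd (List.getLast?_eq_none_iff.mp hgl) hne
      | some d => exact ⟨d, rfl⟩
    have hdne : d ≠ ' ' := fun h => hl (h ▸ hd)
    have e0 : PySem.Str.pyGet? s 0 = some c := by simp [hs]
    have e1 : PySem.Str.pyGet? s (-1) = some d := by
      have h1 := pvPyGet_neg_one s.toList hne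
      simp [h1, hd]
    have hA : escape_localpart_py (some s) = some (String.ofList (s.toList.flatMap pvTab)) := by
      show (match PySem.Str.pyGet? s 0, PySem.Str.pyGet? s (-1) with
            | some c0, some cl =>
              if c0 = ' ' ∨ cl = ' ' then none
              else some (String.ofList (List.foldl
                (fun es c => es ++ (pvXep0106Escape.getD c (String.singleton c)).toList) [] s.toList))
            | _, _ => none) = _
      rw [e0, e1]
      show (if c = ' ' ∨ d = ' ' then none else some _) = _
      rw [if_neg (by rintro (h | h); exacts [hc h, hdne h])]
      refine congrArg some (congrArg String.ofList ?_)
      rw [PySem.List.foldl_append_eq_flatMap (fun c => (pvXep0106Escape.getD c (String.singleton c)).toList)]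
      rfl
    have hsw : PySem.Str.startswith s " " = false := by
      have hb : (' ' == c) = false := beq_eq_false_iff_ne.mpr (fun h => hc h.symm)
      simp [PySem.Str.startswith, PySem.Chars.startswith, hs, List.isPrefixOf, hb]
    have hew : PySem.Str.endswith s " " = false := by
      simp only [PySem.Str.endswith, PySem.Chars.endswith, List.isSuffixOf,
        show (" ".toList) = [' '] from rfl]
      have hrev : s.toList.reverse.head? = some d := by rw [List.head?_reverse, hd]
      obtain ⟨u, hu⟩ : ∃ u, s.toList.reverse = d :: u := by
        cases hr : s.toList.reverse with
        | nil => rw [hr] at hrev; simp at hrev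
        | cons e u => rw [hr] at hrev; simp at hrev; exact ⟨u, by rw [hrev]⟩
      have hb : (' ' == d) = false := beq_eq_false_iff_ne.mpr (fun h => hdne h.symm)
      simp [hu, List.isPrefixOf, hb]
    have hB : escape_localpart_py_alt (some s) = some (String.ofList (s.toList.flatMap pvTab)) := by
      show (if PySem.Str.startswith s " " || PySem.Str.endswith s " " then none
            else some (pvXepPasses.foldl
              (fun out (p : String × String) => PySem.Str.replace out p.1 p.2)
              (PySem.Str.replace s "\\" "\\5c"))) = _
      rw [hsw, hew]
      rw [if_neg (by simp)]
      refine congrArg some (String.toList_inj.mp ?_)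
      simp only [pvXepPasses, List.foldl_cons, List.foldl_nil, PySem.Str.toList_replace,
        String.toList_ofList]
      exact pvChain_eq_flatMap s.toList
    rw [hA, hB]
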